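-- pv_equiv track=rewrite | github.com/bytedance/ic_flow_platform | bin/job_manager.py | clean_dependency
-- ===== SOURCE A (Python) =====
-- def clean_dependency(item_list=None, item=None, dependency=None):
--     if not item_list or not item or not dependency:
--         return ''
--
--     independent_condition_list = dependency.split(',')
--     valid_independent_condition_list = []
--
--     if not independent_condition_list:
--         return ''
--
--     for independent_condition in independent_condition_list:
--         parallel_condition_list = independent_condition.split('|')
--         valid_parallel_condition_list = []
--
--         if not parallel_condition_list:
--             continue
--
--         for parallel_condition in parallel_condition_list:
--             and_condition_list = parallel_condition.split('&')
--             valid_add_condition_list = []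
--
--             if not and_condition_list:
--                 continue
--
--             for and_condition in and_condition_list:
--                 if and_condition.strip() not in item_list:
--                     continue
--                 else:
--                     valid_add_condition_list.append(and_condition.strip())
--
--             valid_parallel_condition = '&'.join(valid_add_condition_list)
--
--             if valid_parallel_condition:
--                 valid_parallel_condition_list.append(valid_parallel_condition)
--
--         valid_independent_condition = '|'.join(valid_parallel_condition_list)
--
--         if valid_independent_condition:
--             valid_independent_condition_list.append(valid_independent_condition)
--
--     valid_dependency = ','.join(valid_independent_condition_list)
--
--     return valid_dependency
-- ===== SOURCE B (Python) =====
-- def clean_dependency(item_list=None, item=None, dependency=None):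
--     if not item_list or not item or not dependency:
--         return ''
--
--     def go(s, seps):
--         if not seps:
--             t = s.strip()
--             return t if t in item_list else None
--         sep = seps[0]
--         kept = [r for p in s.split(sep) if (r := go(p, seps[1:])) is not None]
--         j = sep.join(kept)
--         return j if j else None
--
--     r = go(dependency, [',', '|', '&'])
--     return r if r is not None else ''
-- ===== Notes on version B (the rewrite author's own statement) =====
-- stated objective: simpler
-- what changed: Replaces the three copies of nested split/filter/join loops with one recursive helper driven by the separator list [',','|','&'], using Option/None to distinguish 'no valid subcondition' from an empty kept token.
import Mathlib
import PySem

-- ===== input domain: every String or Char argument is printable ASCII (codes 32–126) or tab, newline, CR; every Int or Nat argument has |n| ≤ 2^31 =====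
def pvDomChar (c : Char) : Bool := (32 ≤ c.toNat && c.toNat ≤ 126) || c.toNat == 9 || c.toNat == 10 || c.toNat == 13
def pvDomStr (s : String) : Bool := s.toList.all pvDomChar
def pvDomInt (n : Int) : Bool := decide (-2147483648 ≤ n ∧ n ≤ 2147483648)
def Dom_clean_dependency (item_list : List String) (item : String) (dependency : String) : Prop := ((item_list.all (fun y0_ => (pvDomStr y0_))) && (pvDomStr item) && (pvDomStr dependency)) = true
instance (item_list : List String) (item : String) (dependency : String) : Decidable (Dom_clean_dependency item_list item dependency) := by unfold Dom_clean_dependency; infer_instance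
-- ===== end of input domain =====

-- B replaces A's three copied nested split/filter/join loops with one recursion driven by the
-- separator list [',','|','&'] (objective: simpler; same return value, no side effects).

-- s.split(sep) for a nonempty literal sep (split? is none only for sep = "")
def cdSplit (s sep : String) : List String := (PySem.Str.split? s sep).getD []

-- ===== PORT A =====
def clean_dependency (item_list : List String) (item : String) (dependency : String) : String :=
  if item_list = [] ∨ item = "" ∨ dependency = "" then ""
  else
    let independent_condition_list := cdSplit dependency ","
    if independent_condition_list = [] then ""
    else
      let valid_independent_condition_list :=
        independent_condition_list.foldl (fun acc1 independent_condition =>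
          let parallel_condition_list := cdSplit independent_condition "|"
          if parallel_condition_list = [] then acc1
          else
            let valid_parallel_condition_list :=
              parallel_condition_list.foldl (fun acc2 parallel_condition =>
                let and_condition_list := cdSplit parallel_condition "&"
                if and_condition_list = [] then acc2
                else
                  let valid_add_condition_list :=
                    and_condition_list.foldl (fun acc3 and_condition =>
                      if PySem.Str.strip and_condition ∈ item_list then
                        acc3 ++ [PySem.Str.strip and_condition]
                      else acc3) []
                  let valid_parallel_condition := PySem.Str.join "&" valid_add_condition_list
                  if valid_parallel_condition ≠ "" then acc2 ++ [valid_parallel_condition] else acc2) []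
            let valid_independent_condition := PySem.Str.join "|" valid_parallel_condition_list
            if valid_independent_condition ≠ "" then acc1 ++ [valid_independent_condition] else acc1) []
      PySem.Str.join "," valid_independent_condition_list

-- ===== PORT B =====
-- go(s, seps): none = "no valid subcondition" (Python None); some t distinguishes a kept token
-- even when t = "" (an empty string that is itself in item_list).
def cdGo (item_list : List String) : List String → String → Option String
  | [], s =>
    let t := PySem.Str.strip s
    if t ∈ item_list then some t else none
  | sep :: rest, s =>
    let kept := (cdSplit s sep).filterMap (cdGo item_list rest)
    let j := PySem.Str.join sep kept
    if j ≠ "" then some j else none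

def clean_dependency_alt (item_list : List String) (item : String) (dependency : String) : String :=
  if item_list = [] ∨ item = "" ∨ dependency = "" then ""
  else (cdGo item_list [",", "|", "&"] dependency).getD ""

-- ===== PRECONDITION & SPEC =====
def Spec_clean_dependency (item_list : List String) (item : String) (dependency : String) (out : String) : Prop := out = clean_dependency_alt item_list item dependency
instance (item_list : List String) (item : String) (dependency : String) (out : String) : Decidable (Spec_clean_dependency item_list item dependency out) := by unfold Spec_clean_dependency; infer_instance

-- ===== CLAIM (what is proved, stated in full; the proofs are below) =====
def Claim_equal_clean_dependency : Prop := ∀ (item_list : List String) (item : String) (dependency : String), Dom_clean_dependency item_list item dependency → Spec_clean_dependency item_list item dependency (clean_dependency item_list item dependency)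

-- ===== LEMMAS AND PROOFS =====

-- A's intermediate joins, named for the proofs.
def aAnd (item_list : List String) (pc : String) : String :=
  PySem.Str.join "&" ((cdSplit pc "&").foldl (fun acc3 and_condition =>
    if PySem.Str.strip and_condition ∈ item_list then
      acc3 ++ [PySem.Str.strip and_condition]
    else acc3) [])

def aPar (item_list : List String) (ic : String) : String :=
  PySem.Str.join "|" ((cdSplit ic "|").foldl (fun acc2 parallel_condition =>
    let and_condition_list := cdSplit parallel_condition "&"
    if and_condition_list = [] then acc2
    else
      let valid_parallel_condition := aAnd item_list parallel_condition
      if valid_parallel_condition ≠ "" then acc2 ++ [valid_parallel_condition] else acc2) [])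

-- A's append-if fold at the '&' level builds exactly the filterMap of B's base case.
theorem cd_and_fold (item_list : List String) (l : List String) (acc : List String) :
    l.foldl (fun acc3 and_condition =>
      if PySem.Str.strip and_condition ∈ item_list then
        acc3 ++ [PySem.Str.strip and_condition]
      else acc3) acc
    = acc ++ l.filterMap (cdGo item_list []) := by
  induction l generalizing acc with
  | nil => simp
  | cons h t ih =>
    simp only [List.foldl, List.filterMap_cons]
    by_cases hm : PySem.Str.strip h ∈ item_list
    · rw [if_pos hm, ih]
      simp [cdGo, hm]
    · rw [if_neg hm, ih]
      simp [cdGo, hm]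

-- A's append-if-nonempty fold is the filterMap of the none-if-empty function.
theorem cd_ne_fold (g : String → String) (l : List String) (acc : List String) :
    l.foldl (fun a p => if g p ≠ "" then a ++ [g p] else a) acc
    = acc ++ l.filterMap (fun p => if g p ≠ "" then some (g p) else none) := by
  induction l generalizing acc with
  | nil => simp
  | cons h t ih =>
    simp only [List.foldl, List.filterMap_cons]
    by_cases hg : g h = ""
    · rw [if_neg (by simp [hg]), ih]
      simp [hg]
    · rw [if_pos (by simp [hg]), ih]
      simp [hg]

theorem cdGo_and (item_list : List String) (pc : String) :
    cdGo item_list ["&"] pc = if aAnd item_list pc ≠ "" then some (aAnd item_list pc) else none := by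
  simp only [cdGo, aAnd, cd_and_fold, List.nil_append]

theorem cd_par_fold (item_list : List String) (l : List String) (acc : List String) :
    l.foldl (fun acc2 parallel_condition =>
      let and_condition_list := cdSplit parallel_condition "&"
      if and_condition_list = [] then acc2
      else
        let valid_parallel_condition := aAnd item_list parallel_condition
        if valid_parallel_condition ≠ "" then acc2 ++ [valid_parallel_condition] else acc2) acc
    = acc ++ l.filterMap (cdGo item_list ["&"]) := by
  rw [PySem.List.foldl_congr_mem (g := fun a p =>
        if aAnd item_list p ≠ "" then a ++ [aAnd item_list p] else a)]
  · rw [cd_ne_fold]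
    congr 1
    exact List.filterMap_congr fun pc _ => (cdGo_and item_list pc).symm
  · intro a pc _
    by_cases hnil : cdSplit pc "&" = []
    · have hj : aAnd item_list pc = "" := by simp [aAnd, hnil]; rfl
      simp [hnil, hj]
    · simp [hnil]

theorem cdGo_par (item_list : List String) (ic : String) :
    cdGo item_list ["|", "&"] ic = if aPar item_list ic ≠ "" then some (aPar item_list ic) else none := by
  simp only [cdGo, aPar, cd_par_fold, List.nil_append]

theorem cd_ind_fold (item_list : List String) (l : List String) (acc : List String) :
    l.foldl (fun acc1 independent_condition =>
      let parallel_condition_list := cdSplit independent_condition "|"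
      if parallel_condition_list = [] then acc1
      else
        let valid_parallel_condition_list :=
          parallel_condition_list.foldl (fun acc2 parallel_condition =>
            let and_condition_list := cdSplit parallel_condition "&"
            if and_condition_list = [] then acc2
            else
              let valid_add_condition_list :=
                and_condition_list.foldl (fun acc3 and_condition =>
                  if PySem.Str.strip and_condition ∈ item_list then
                    acc3 ++ [PySem.Str.strip and_condition]
                  else acc3) []
              let valid_parallel_condition := PySem.Str.join "&" valid_add_condition_list
              if valid_parallel_condition ≠ "" then acc2 ++ [valid_parallel_condition] else acc2) []
        let valid_independent_condition := PySem.Str.join "|" valid_parallel_condition_list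
        if valid_independent_condition ≠ "" then acc1 ++ [valid_independent_condition] else acc1) acc
    = acc ++ l.filterMap (cdGo item_list ["|", "&"]) := by
  rw [PySem.List.foldl_congr_mem (g := fun a p =>
        if aPar item_list p ≠ "" then a ++ [aPar item_list p] else a)]
  · rw [cd_ne_fold]
    congr 1
    exact List.filterMap_congr fun ic _ => (cdGo_par item_list ic).symm
  · intro a ic _
    by_cases hnil : cdSplit ic "|" = []
    · have hj : aPar item_list ic = "" := by simp [aPar, hnil]; rfl
      simp [hnil, hj]
    · simp only [aPar, aAnd, if_neg hnil]

theorem clean_dependency_spec : Claim_equal_clean_dependency := by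
  intro item_list item dependency _hdom
  unfold Spec_clean_dependency clean_dependency clean_dependency_alt
  by_cases hg : item_list = [] ∨ item = "" ∨ dependency = ""
  · simp [hg]
  · rw [if_neg hg, if_neg hg]
    have htop : cdGo item_list [",", "|", "&"] dependency
        = (if PySem.Str.join "," ((cdSplit dependency ",").filterMap (cdGo item_list ["|", "&"])) ≠ ""
             then some (PySem.Str.join "," ((cdSplit dependency ",").filterMap (cdGo item_list ["|", "&"])))
             else none) := rfl
    rw [htop]
    have hfold := cd_ind_fold item_list (cdSplit dependency ",") []
    by_cases hnil : cdSplit dependency "," = []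
    · rw [if_pos hnil, hnil]
      simp
      rfl
    · rw [if_neg hnil]
      show PySem.Str.join "," ((cdSplit dependency ",").foldl _ []) = _
      rw [hfold, List.nil_append]
      by_cases hJ : PySem.Str.join ","
          ((cdSplit dependency ",").filterMap (cdGo item_list ["|", "&"])) = ""
      · simp [hJ]
      · simp [hJ]
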